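-- pv_equiv track=rewrite | github.com/Kim-YoungWoong/Programmers | Level1 - 비밀지도.py | solution
-- ===== SOURCE A (Python) =====
-- def convert(n, arr, result):
--     for i in range(n):
--         result.append(bin(arr[i]))
--         result[i] = result[i][2:]
--         while len(result[i]) != n:
--             result[i] = '0' + result[i]
--
--     return result
--
-- def solution(n, arr1, arr2):
--     answer = []
--     bin1, bin2 = [], []
--     newList = []
--     # 1. arr1, arr2을 2진수로 변환해서 저장
--     convert(n, arr1, bin1)
--     convert(n, arr2, bin2)
--     # 2. arr1, arr2 각 원소끼리 비교해서 둘다 0인것 빼고 1로 바꿔서 새로운 배열에 저장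
--     for i in range(len(bin1)):
--         oneline = ''
--         for j in range(len(bin1)):
--             if bin1[i][j] == '0' and bin2[i][j] == '0':
--                 oneline += '0'
--             else:
--                 oneline += '1'
--         newList.append(oneline)
--     # 3. 1은 #으로 0은 공백으로 바꿔서 출력
--     for i in newList:
--         oneline = ''
--         for j in i:
--             if j == '1':
--                 oneline += '#'
--             else:
--                 oneline += ' '
--         answer.append(oneline)
--
--     return answer
-- ===== SOURCE B (Python) =====
-- def solution(n, arr1, arr2):
--     answer = []
--     for i in range(n):
--         cols = set()
--         for x in (arr1[i], arr2[i]):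
--             s = bin(x)[2:]
--             for j, c in enumerate(s):
--                 if c != '0':
--                     cols.add(len(s) - 1 - j)
--         answer.append(''.join('#' if n - 1 - k in cols else ' ' for k in range(n)))
--     return answer
-- ===== Notes on version B (the rewrite author's own statement) =====
-- stated objective: alternative
-- what changed: B replaces A's pipeline (two helper bin-conversions with a char-at-a-time '0'-prepending while-loop per row, a nested char-comparison pass building '0'/'1' strings, then a second remapping pass) with one pass per row that collects the set of lit column positions of each entry's binary rendering and paints the row by set membership.
import Mathlib
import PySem

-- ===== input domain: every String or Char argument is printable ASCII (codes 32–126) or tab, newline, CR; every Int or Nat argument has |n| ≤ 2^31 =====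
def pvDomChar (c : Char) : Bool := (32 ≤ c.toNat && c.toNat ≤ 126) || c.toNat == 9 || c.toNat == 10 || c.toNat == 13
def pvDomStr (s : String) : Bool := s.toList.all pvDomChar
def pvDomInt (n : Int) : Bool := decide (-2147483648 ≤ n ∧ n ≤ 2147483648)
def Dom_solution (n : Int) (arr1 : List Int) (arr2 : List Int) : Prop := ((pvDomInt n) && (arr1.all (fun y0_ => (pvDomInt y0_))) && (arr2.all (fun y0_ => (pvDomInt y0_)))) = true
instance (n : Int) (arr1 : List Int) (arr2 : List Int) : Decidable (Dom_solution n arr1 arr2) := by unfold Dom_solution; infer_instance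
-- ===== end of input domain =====

-- B collects, per row, the set of lit column positions of each entry's binary rendering
-- and paints the row by set membership — no zero-padding loop, no intermediate '0'/'1'
-- strings, no second remapping pass (objective: alternative).

-- ===== PORT A =====
-- shared with port B: the digits of Python's binary rendering of a nonneg integer
-- (both Pythons call the same built-in bin())
def pvBits (m : Nat) : List Char :=
  if m = 0 then [] else pvBits (m / 2) ++ [if m % 2 = 1 then '1' else '0']
decreasing_by exact Nat.div_lt_self (Nat.pos_of_ne_zero (by assumption)) (by omega)

-- bin(x)
def pvBin (x : Int) : List Char :=
  if x < 0 then ['-', '0', 'b'] ++ (if x = 0 then ['0'] else pvBits (-x).toNat)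
  else ['0', 'b'] ++ (if x = 0 then ['0'] else pvBits x.toNat)

-- A's `while len(result[i]) != n: result[i] = '0' + result[i]`
-- (totalized: Python diverges when len > n; those inputs are outside Pre_)
def pvPad (n : Int) (s : List Char) : List Char :=
  if (s.length : Int) < n then pvPad n ('0' :: s) else s
termination_by (n - s.length).toNat
decreasing_by simp [List.length_cons]; omega

-- A's helper convert(n, arr, result) as the list it leaves in result
def pvConvert (n : Int) (arr : List Int) : List (List Char) :=
  (PySem.List.pyRange 0 n 1).map
    (fun i => pvPad n ((pvBin (PySem.List.pyGetD arr i 0)).drop 2))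

def solution (n : Int) (arr1 : List Int) (arr2 : List Int) : List String :=
  let bin1 := pvConvert n arr1
  let bin2 := pvConvert n arr2
  let newList := (List.range bin1.length).map (fun i =>
    (List.range bin1.length).map (fun j =>
      if (bin1.getD i []).getD j ' ' = '0' ∧ (bin2.getD i []).getD j ' ' = '0'
      then '0' else '1'))
  newList.map (fun row => String.ofList (row.map (fun c => if c = '1' then '#' else ' ')))

-- ===== PORT B =====
-- `for j, c in enumerate(s): if c != '0': cols.add(len(s) - 1 - j)`
def pvCols (s : List Char) (acc : PySem.Set Int) : PySem.Set Int :=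
  (PySem.List.enumerate s).foldl
    (fun a jc => if jc.2 ≠ '0' then PySem.Set.add a ((s.length : Int) - 1 - jc.1) else a) acc

def solution_alt (n : Int) (arr1 : List Int) (arr2 : List Int) : List String :=
  (PySem.List.pyRange 0 n 1).map (fun i =>
    let cols := pvCols ((pvBin (PySem.List.pyGetD arr2 i 0)).drop 2)
      (pvCols ((pvBin (PySem.List.pyGetD arr1 i 0)).drop 2) PySem.Set.empty)
    String.ofList ((PySem.List.pyRange 0 n 1).map (fun k =>
      if (n - 1 - k) ∈ cols then '#' else ' ')))

-- ===== PRECONDITION & SPEC =====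
-- Pre_ is exactly where A terminates: both arrays hold at least n rows and each of the
-- first n entries fits in an n-character row (x < 2^n for x ≥ 0; |x| < 2^(n-1) for x < 0,
-- whose rendering bin(x)[2:] = 'b'+bits(|x|) is one character wider).  Outside it A raises
-- IndexError (arrays shorter than n > 0) or diverges in its padding while-loop.
def Pre_solution (n : Int) (arr1 : List Int) (arr2 : List Int) : Prop :=
  n ≤ arr1.length ∧ n ≤ arr2.length ∧
  (∀ x ∈ arr1.take n.toNat, if 0 ≤ x then x < 2 ^ n.toNat else -x < 2 ^ (n.toNat - 1)) ∧
  (∀ x ∈ arr2.take n.toNat, if 0 ≤ x then x < 2 ^ n.toNat else -x < 2 ^ (n.toNat - 1))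
instance (n : Int) (arr1 : List Int) (arr2 : List Int) : Decidable (Pre_solution n arr1 arr2) := by
  unfold Pre_solution; infer_instance

def pvWitness_solution : Int × List Int × List Int := (2, [1, 2], [3, 0])

def Spec_solution (n : Int) (arr1 : List Int) (arr2 : List Int) (out : List String) : Prop := out = solution_alt n arr1 arr2
instance (n : Int) (arr1 : List Int) (arr2 : List Int) (out : List String) : Decidable (Spec_solution n arr1 arr2 out) := by unfold Spec_solution; infer_instance

-- ===== CLAIM (what is proved, stated in full; the proofs are below) =====
def Claim_equal_solution : Prop := ∀ (n : Int) (arr1 : List Int) (arr2 : List Int), Dom_solution n arr1 arr2 → Pre_solution n arr1 arr2 → Spec_solution n arr1 arr2 (solution n arr1 arr2)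

-- ===== LEMMAS AND PROOFS =====
theorem bits_len_le (m k : Nat) (h : m < 2 ^ k) (hm : 0 < m) : (pvBits m).length ≤ k := by
  induction m using Nat.strong_induction_on generalizing k with
  | _ m ih =>
    rw [pvBits]
    rw [if_neg (by omega)]
    simp only [List.length_append, List.length_singleton]
    by_cases h2 : m / 2 = 0
    · rw [h2]; rw [pvBits]; simp
      rcases Nat.eq_zero_or_pos k with hk | hk
      · subst hk; simp at h; omega
      · omega
    · have hk1 : 1 ≤ k := by
        by_contra hc
        interval_cases k
        simp at h; omega
      have : m / 2 < 2 ^ (k - 1) := by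
        have : 2 ^ k = 2 ^ (k - 1) * 2 := by
          rw [← pow_succ]; congr 1; omega
        omega
      have := ih (m/2) (Nat.div_lt_self hm (by omega)) (k-1) this (Nat.pos_of_ne_zero h2)
      omega

theorem pvPad_eq (n : Int) (s : List Char) :
    pvPad n s = List.replicate (n.toNat - s.length) '0' ++ s := by
  fun_induction pvPad with
  | case1 s h ih =>
    rw [ih]
    have h1 : s.length < n.toNat := by omega
    have : n.toNat - s.length = (n.toNat - ('0'::s).length) + 1 := by simp; omega
    rw [this, List.replicate_succ']
    simp
  | case2 s h =>
    have : n.toNat - s.length = 0 := by omega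
    simp [this]

-- length of bin(x)[2:] fits in n characters under Pre_'s fit condition
theorem len_drop_le (n x : Int) (hk : 0 < n.toNat)
    (hc : if 0 ≤ x then x < 2 ^ n.toNat else -x < 2 ^ (n.toNat - 1)) :
    ((pvBin x).drop 2).length ≤ n.toNat := by
  unfold pvBin
  by_cases hx : 0 ≤ x
  · rw [if_neg (by omega)]
    rw [if_pos hx] at hc
    simp only [List.cons_append, List.nil_append, List.drop_succ_cons, List.drop_zero]
    by_cases h0 : x = 0
    · simp [h0]; omega
    · rw [if_neg h0]
      have hlt : x.toNat < 2 ^ n.toNat := by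
        have : ((x.toNat : Int)) < ((2 ^ n.toNat : Nat) : Int) := by
          rw [Int.toNat_of_nonneg hx]; push_cast; exact hc
        exact_mod_cast this
      exact bits_len_le _ _ hlt (by omega)
  · rw [if_pos (by omega), if_neg (by omega)]
    rw [if_neg hx] at hc
    simp only [List.cons_append, List.nil_append, List.drop_succ_cons, List.drop_zero]
    have hlt : (-x).toNat < 2 ^ (n.toNat - 1) := by
      have : (((-x).toNat : Int)) < ((2 ^ (n.toNat - 1) : Nat) : Int) := by
        rw [Int.toNat_of_nonneg (by omega)]; push_cast; exact hc
      exact_mod_cast this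
    have := bits_len_le (-x).toNat (n.toNat - 1) hlt (by omega)
    simp; omega

-- membership in the conditional-add fold underlying pvCols
theorem mem_condfold (L : Int) (l : List (Int × Char)) (acc : PySem.Set Int) (m : Int) :
    m ∈ l.foldl
      (fun a jc => if jc.2 ≠ '0' then PySem.Set.add a (L - 1 - jc.1) else a) acc
    ↔ m ∈ acc ∨ ∃ jc ∈ l, jc.2 ≠ '0' ∧ m = L - 1 - jc.1 := by
  induction l generalizing acc with
  | nil => simp
  | cons hd tl ih =>
    simp only [List.foldl_cons, ih, List.mem_cons]
    by_cases h : hd.2 = '0'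
    · rw [if_neg (by simp [h])]
      constructor
      · rintro (h1 | ⟨jc, hjc, h2⟩)
        · exact Or.inl h1
        · exact Or.inr ⟨jc, Or.inr hjc, h2⟩
      · rintro (h1 | ⟨jc, (rfl | hjc), h2, h3⟩)
        · exact Or.inl h1
        · exact absurd h h2
        · exact Or.inr ⟨jc, hjc, h2, h3⟩
    · rw [if_pos (by simp [h])]
      simp only [PySem.Set.mem_add]
      constructor
      · rintro ((h1 | h1) | ⟨jc, hjc, h2⟩)
        · exact Or.inl h1
        · exact Or.inr ⟨hd, Or.inl rfl, h, h1⟩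
        · exact Or.inr ⟨jc, Or.inr hjc, h2⟩
      · rintro (h1 | ⟨jc, (rfl | hjc), h2, h3⟩)
        · exact Or.inl (Or.inl h1)
        · exact Or.inl (Or.inr h3)
        · exact Or.inr ⟨jc, hjc, h2, h3⟩

theorem mem_pvCols (s : List Char) (acc : PySem.Set Int) (m : Int) :
    m ∈ pvCols s acc
    ↔ m ∈ acc ∨ ∃ j : Nat, j < s.length ∧ s.getD j ' ' ≠ '0'
        ∧ m = (s.length : Int) - 1 - j := by
  unfold pvCols
  rw [mem_condfold]
  apply or_congr Iff.rfl
  constructor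
  · rintro ⟨jc, hjc, h2, h3⟩
    obtain ⟨k, hk, rfl⟩ := (PySem.List.mem_enumerate_iff _ _ _).mp hjc
    refine ⟨k, hk, ?_, by simpa using h3⟩
    rw [List.getD_eq_getElem _ _ hk]
    simpa using h2
  · rintro ⟨j, hj, h2, h3⟩
    refine ⟨((j : Int), s[j]), ?_, ?_, by simpa using h3⟩
    · exact (PySem.List.mem_enumerate_iff _ _ _).mpr ⟨j, hj, by simp⟩
    · rw [List.getD_eq_getElem _ _ hj] at h2
      simpa using h2

-- the padded row char at column k is non-'0' exactly when some lit position of the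
-- unpadded string lands there
theorem lit_iff_pad (n : Int) (s : List Char) (k : Nat)
    (hlen : s.length ≤ n.toNat) (hk : k < n.toNat) :
    (∃ j : Nat, j < s.length ∧ s.getD j ' ' ≠ '0'
        ∧ (n : Int) - 1 - (k : Int) = (s.length : Int) - 1 - j)
    ↔ (pvPad n s).getD k ' ' ≠ '0' := by
  have hn : ((n.toNat : Int)) = n := Int.toNat_of_nonneg (by omega)
  rw [pvPad_eq]
  by_cases hlt : k < n.toNat - s.length
  · rw [List.getD_append _ _ _ _ (by simpa using hlt)]
    rw [List.getD_replicate _ hlt]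
    refine iff_of_false ?_ (by simp)
    rintro ⟨j, hj, h2, h3⟩
    omega
  · rw [List.getD_append_right _ _ _ _ (by simp; omega)]
    simp only [List.length_replicate]
    constructor
    · rintro ⟨j, hj, h2, h3⟩
      have : k - (n.toNat - s.length) = j := by omega
      rwa [this]
    · intro h
      exact ⟨k - (n.toNat - s.length), by omega, h, by omega⟩

theorem mem_take_getD {arr : List Int} {n : Int} {i : Nat}
    (hik : i < n.toNat) (hlen : n ≤ (arr.length : Int)) :
    arr.getD i 0 ∈ arr.take n.toNat := by
  have hil : i < arr.length := by omega
  rw [List.getD_eq_getElem _ _ hil]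
  have h2 : i < (arr.take n.toNat).length := by simp; omega
  have : (arr.take n.toNat)[i] = arr[i] := List.getElem_take
  rw [← this]
  exact List.getElem_mem h2

theorem convert_eq (n : Int) (arr : List Int) :
    pvConvert n arr
    = (List.range n.toNat).map (fun i => pvPad n ((pvBin (arr.getD i 0)).drop 2)) := by
  unfold pvConvert
  rw [PySem.List.pyRange_zero, List.map_map]
  apply List.map_congr_left
  intro i _
  simp only [Function.comp_apply]
  rw [PySem.List.pyGetD_natCast]

-- one row: A's padded char-compare-then-remap equals B's membership paint
theorem rowEq (n : Int) (s1 s2 : List Char)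
    (h1 : s1.length ≤ n.toNat) (h2 : s2.length ≤ n.toNat) :
    ((List.range n.toNat).map (fun j =>
        if (pvPad n s1).getD j ' ' = '0' ∧ (pvPad n s2).getD j ' ' = '0'
        then '0' else '1')).map (fun c => if c = '1' then '#' else ' ')
    = ((List.range n.toNat).map (fun (k : Nat) => (k : Int))).map (fun k =>
        if (n - 1 - k) ∈ pvCols s2 (pvCols s1 PySem.Set.empty) then '#' else ' ') := by
  rw [List.map_map, List.map_map]
  apply List.map_congr_left
  intro k hk
  have hk' : k < n.toNat := List.mem_range.mp hk
  simp only [Function.comp_apply]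
  have hmem : (n - 1 - (k : Int)) ∈ pvCols s2 (pvCols s1 PySem.Set.empty)
      ↔ ((pvPad n s1).getD k ' ' ≠ '0' ∨ (pvPad n s2).getD k ' ' ≠ '0') := by
    rw [mem_pvCols, mem_pvCols]
    simp only [PySem.Set.empty, List.not_mem_nil, false_or]
    rw [lit_iff_pad n s1 k h1 hk', lit_iff_pad n s2 k h2 hk']
  by_cases hc : (pvPad n s1).getD k ' ' = '0' ∧ (pvPad n s2).getD k ' ' = '0'
  · have hm : ¬ (n - 1 - (k : Int)) ∈ pvCols s2 (pvCols s1 PySem.Set.empty) := by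
      rw [hmem]
      exact fun h => h.elim (fun h1 => h1 hc.1) (fun h2 => h2 hc.2)
    rw [if_pos hc, if_neg hm, if_neg (show ¬('0' : Char) = '1' by decide)]
  · have hm : (n - 1 - (k : Int)) ∈ pvCols s2 (pvCols s1 PySem.Set.empty) :=
      hmem.mpr (by tauto)
    rw [if_neg hc, if_pos hm, if_pos rfl]

theorem main_eq (n : Int) (arr1 arr2 : List Int) (h : Pre_solution n arr1 arr2) :
    solution n arr1 arr2 = solution_alt n arr1 arr2 := by
  obtain ⟨hl1, hl2, hb1, hb2⟩ := h
  unfold solution solution_alt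
  rw [convert_eq n arr1, convert_eq n arr2, PySem.List.pyRange_zero, List.map_map]
  apply List.ext_getElem
  · simp
  · intro i hlen1 hlen2
    have hik : i < n.toNat := by simpa using hlen1
    simp only [List.getElem_map, List.getElem_range, List.length_map, List.length_range,
      Function.comp_apply]
    rw [PySem.List.pyGetD_natCast, PySem.List.pyGetD_natCast]
    set a := arr1.getD i 0 with ha
    set b := arr2.getD i 0 with hb
    have hc1 := hb1 _ (mem_take_getD hik hl1)
    have hc2 := hb2 _ (mem_take_getD hik hl2)
    have hg1 : ((List.range n.toNat).map
        (fun i => pvPad n ((pvBin (arr1.getD i 0)).drop 2))).getD i []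
        = pvPad n ((pvBin a).drop 2) := PySem.List.getD_map_range _ _ _ _ hik
    have hg2 : ((List.range n.toNat).map
        (fun i => pvPad n ((pvBin (arr2.getD i 0)).drop 2))).getD i []
        = pvPad n ((pvBin b).drop 2) := PySem.List.getD_map_range _ _ _ _ hik
    rw [hg1, hg2]
    congr 1
    exact rowEq n ((pvBin a).drop 2) ((pvBin b).drop 2)
      (len_drop_le n a (by omega) hc1) (len_drop_le n b (by omega) hc2)

-- ===== VERDICT (by name: the statement is the Claim_ definition above) =====
theorem solution_spec : Claim_equal_solution := by
  intro n arr1 arr2 _ hpre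
  exact main_eq n arr1 arr2 hpre
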